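-- pv_equiv track=rewrite | github.com/Karki-Biplab/Py_start | nomem13_encoding_decding.py | nomem13_encode
-- ===== SOURCE A (Python) =====
-- import string
--
-- ALPHABET = string.ascii_uppercase
--
-- DIGIT_FLIP = {'0': '0', '1': '9', '2': '8', '3': '7', '4': '6',
--               '5': '5', '6': '4', '7': '3', '8': '2', '9': '1'}
--
-- def rotate_char(c, shift):
--     if c.upper() not in ALPHABET:
--         return c
--     idx = ALPHABET.index(c.upper())
--     new_idx = (idx + shift) % 26
--     new_char = ALPHABET[new_idx]
--     return new_char if c.isupper() else new_char.lower()
--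
-- def flip_digits(text):
--     return ''.join(DIGIT_FLIP.get(ch, ch) for ch in text)
--
-- def nomem13_encode(text):
--     encoded = []
--     words = text.split()
--
--     for word in words:
--         if word.isdigit():
--             encoded.append(flip_digits(word))
--             continue
--
--         if not word:
--             continue
--
--         anchor = word[0]
--         shift = 13 if anchor.lower() in 'aeiou' else -13
--         transformed = ""
--
--         for ch in word:
--             if ch.upper() == 'M':
--                 transformed += ch  # M stays the same
--             elif ch.isalpha():
--                 transformed += rotate_char(ch, shift)
--             elif ch.isdigit():
--                 transformed += DIGIT_FLIP.get(ch, ch)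
--             else:
--                 transformed += ch
--
--         encoded.append(transformed)
--
--     return "::k13:: " + ' '.join(encoded)
-- ===== SOURCE B (Python) =====
-- import string
--
-- # One translation table built once: rot13 for letters (M/m fixed), digit flip, all else pass-through.
-- _TABLE = {}
-- for _i, _c in enumerate(string.ascii_uppercase):
--     _r = string.ascii_uppercase[(_i + 13) % 26]
--     _TABLE[_c] = _r
--     _TABLE[_c.lower()] = _r.lower()
-- _TABLE['M'] = 'M'
-- _TABLE['m'] = 'm'
-- for _d, _f in zip('0123456789', '0987654321'):
--     _TABLE[_d] = _f
-- _TRANS = str.maketrans(_TABLE)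
--
-- def nomem13_encode(text):
--     return "::k13:: " + " ".join(word.translate(_TRANS) for word in text.split())
-- ===== Notes on version B (the rewrite author's own statement) =====
-- stated objective: faster
-- what changed: Replaces the per-word anchor/shift computation, the dead pure-digit and empty-word branches and the four-way per-character branch chain (with a 26-letter index scan per letter) by one translation table built once at module load (rot13 with M/m fixed plus digit flips) and a single table-driven str.translate pass per word.
import Mathlib
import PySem

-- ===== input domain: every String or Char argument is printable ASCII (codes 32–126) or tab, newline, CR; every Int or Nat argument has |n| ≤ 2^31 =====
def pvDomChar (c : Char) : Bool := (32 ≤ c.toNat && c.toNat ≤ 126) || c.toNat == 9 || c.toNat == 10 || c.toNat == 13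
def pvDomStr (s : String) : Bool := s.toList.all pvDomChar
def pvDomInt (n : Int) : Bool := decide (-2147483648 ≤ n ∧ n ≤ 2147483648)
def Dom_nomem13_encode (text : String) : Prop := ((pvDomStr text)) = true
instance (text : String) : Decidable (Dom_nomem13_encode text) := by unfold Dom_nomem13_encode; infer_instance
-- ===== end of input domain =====

-- B builds one rot13+digit-flip translation table once and translates each word through it (one lookup per char, measured faster); A = B is proved on the whole ASCII domain.

-- ===== PORT A =====
def ALPHABET : List Char := "ABCDEFGHIJKLMNOPQRSTUVWXYZ".toList

def DIGIT_FLIP : PySem.Dict Char Char :=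
  PySem.Dict.ofList [('0','0'),('1','9'),('2','8'),('3','7'),('4','6'),('5','5'),('6','4'),('7','3'),('8','2'),('9','1')]

-- `c.upper() not in ALPHABET` on a single char = list membership (exact for 1-char needles)
def rotate_char (c : Char) (shift : Int) : Char :=
  if ¬ (ALPHABET.contains (PySem.Chars.upperChar c)) then c
  else
    let idx : Nat := (PySem.List.index? ALPHABET (PySem.Chars.upperChar c)).getD 0
    let new_idx : Int := PySem.Int.mod ((idx : Int) + shift) 26
    let new_char : Char := (PySem.List.pyGet? ALPHABET new_idx).getD c
    if PySem.Chars.isupper c then new_char else PySem.Chars.lowerChar new_char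

-- ''.join over per-char strings = String.ofList of the mapped chars (exact)
def flip_digits (text : String) : String :=
  String.ofList (text.toList.map (fun ch => PySem.Dict.getD DIGIT_FLIP ch ch))

def nomem13_encode (text : String) : String :=
  let words := PySem.Str.split₀ text
  let encoded := words.foldl (fun encoded word =>
    if PySem.Str.strIsdigit word then encoded ++ [flip_digits word]
    else if word = "" then encoded
    else
      let anchor : Char := (PySem.List.pyGet? word.toList 0).getD ' '
      let shift : Int := if "aeiou".toList.contains (PySem.Chars.lowerChar anchor) then 13 else -13
      -- transformed += <1-char-string> accumulates chars; String.ofList at the end (exact)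
      let transformed : List Char := word.toList.foldl (fun t ch =>
        if PySem.Chars.upperChar ch = 'M' then t ++ [ch]
        else if PySem.Chars.isalpha ch then t ++ [rotate_char ch shift]
        else if PySem.Chars.isdigit ch then t ++ [PySem.Dict.getD DIGIT_FLIP ch ch]
        else t ++ [ch]) []
      encoded ++ [String.ofList transformed]) []
  "::k13:: " ++ PySem.Str.join " " encoded

-- ===== PORT B =====
def pvTable : PySem.Dict Char Char :=
  let up := "ABCDEFGHIJKLMNOPQRSTUVWXYZ".toList
  let t := (PySem.List.enumerate up).foldl (fun t p =>
    let r : Char := (PySem.List.pyGet? up (PySem.Int.mod (p.1 + 13) 26)).getD p.2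
    (t.insert p.2 r).insert (PySem.Chars.lowerChar p.2) (PySem.Chars.lowerChar r)) PySem.Dict.empty
  let t := (t.insert 'M' 'M').insert 'm' 'm'
  ("0123456789".toList.zip "0987654321".toList).foldl (fun t p => t.insert p.1 p.2) t

-- word.translate(table): chars absent from the table pass through = getD with the char itself
def nomem13_encode_alt (text : String) : String :=
  "::k13:: " ++ PySem.Str.join " " ((PySem.Str.split₀ text).map (fun w =>
    String.ofList (w.toList.map (fun c => PySem.Dict.getD pvTable c c))))

-- ===== PRECONDITION & SPEC =====
def Spec_nomem13_encode (text : String) (out : String) : Prop := out = nomem13_encode_alt text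
instance (text : String) (out : String) : Decidable (Spec_nomem13_encode text out) := by unfold Spec_nomem13_encode; infer_instance

-- ===== CLAIM (what is proved, stated in full; the proofs are below) =====
def Claim_equal_nomem13_encode : Prop := ∀ (text : String), Dom_nomem13_encode text → Spec_nomem13_encode text (nomem13_encode text)

-- ===== LEMMAS AND PROOFS =====

-- A's per-character transform, as a function
def pvStepA (shift : Int) (ch : Char) : Char :=
  if PySem.Chars.upperChar ch = 'M' then ch
  else if PySem.Chars.isalpha ch then rotate_char ch shift
  else if PySem.Chars.isdigit ch then PySem.Dict.getD DIGIT_FLIP ch ch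
  else ch

-- B's per-character transform
def pvStepB (c : Char) : Char := PySem.Dict.getD pvTable c c

set_option maxRecDepth 4096 in
lemma pv_char_ok : ∀ n ∈ List.range 128,
    pvStepA 13 (Char.ofNat n) = pvStepB (Char.ofNat n) ∧
    pvStepA (-13) (Char.ofNat n) = pvStepB (Char.ofNat n) ∧
    (PySem.Chars.isdigit (Char.ofNat n) = true →
      PySem.Dict.getD DIGIT_FLIP (Char.ofNat n) (Char.ofNat n) = pvStepB (Char.ofNat n)) := by
  decide

lemma pv_lt128 {c : Char} (h : pvDomChar c = true) : c.toNat < 128 := by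
  simp [pvDomChar] at h; omega

lemma pv_stepA_eq (c : Char) (h : pvDomChar c = true) (shift : Int)
    (hs : shift = 13 ∨ shift = -13) : pvStepA shift c = pvStepB c := by
  have hlt := pv_lt128 h
  have := pv_char_ok c.toNat (List.mem_range.mpr hlt)
  rw [Char.ofNat_toNat] at this
  rcases hs with rfl | rfl
  · exact this.1
  · exact this.2.1

lemma pv_flip_eq (c : Char) (h : pvDomChar c = true) (hd : PySem.Chars.isdigit c = true) :
    PySem.Dict.getD DIGIT_FLIP c c = pvStepB c := by
  have hlt := pv_lt128 h
  have := pv_char_ok c.toNat (List.mem_range.mpr hlt)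
  rw [Char.ofNat_toNat] at this
  exact this.2.2 hd

lemma pv_split₀_go_spec (P : Char → Prop) :
    ∀ (rest cur : List Char) (acc : List (List Char)),
      (∀ c ∈ rest, P c) → (∀ c ∈ cur, P c) →
      (∀ w ∈ acc, w ≠ [] ∧ ∀ c ∈ w, P c) →
      ∀ w ∈ PySem.Chars.split₀.go rest cur acc, w ≠ [] ∧ ∀ c ∈ w, P c := by
  intro rest
  induction rest with
  | nil =>
      intro cur acc _ hcur hacc w hw
      by_cases hc : cur.isEmpty
      · simp only [PySem.Chars.split₀.go, hc, if_pos] at hw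
        exact hacc w (List.mem_reverse.mp hw)
      · simp only [PySem.Chars.split₀.go, hc, if_neg, Bool.false_eq_true, not_false_iff] at hw
        rcases List.mem_cons.mp (List.mem_reverse.mp hw) with h | h
        · subst h
          refine ⟨by simpa [List.isEmpty_iff] using hc, ?_⟩
          intro c hcmem; exact hcur c (List.mem_reverse.mp hcmem)
        · exact hacc w h
  | cons c rest ih =>
      intro cur acc hrest hcur hacc w hw
      have hrest' : ∀ x ∈ rest, P x := fun x hx => hrest x (List.mem_cons_of_mem _ hx)
      by_cases hs : PySem.Chars.isspace c
      · by_cases hc : cur.isEmpty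
        · simp only [PySem.Chars.split₀.go, hs, hc, if_pos] at hw
          exact ih [] acc hrest' (by simp) hacc w hw
        · simp only [PySem.Chars.split₀.go, hs, hc, if_pos] at hw
          refine ih [] _ hrest' (by simp) ?_ w hw
          intro v hv
          rcases List.mem_cons.mp hv with h | h
          · subst h
            refine ⟨by simpa [List.isEmpty_iff] using hc, ?_⟩
            intro x hx; exact hcur x (List.mem_reverse.mp hx)
          · exact hacc v h
      · simp only [PySem.Chars.split₀.go, hs, if_neg, Bool.false_eq_true, not_false_iff] at hw
        refine ih (c :: cur) acc hrest' ?_ hacc w hw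
        intro x hx
        rcases List.mem_cons.mp hx with h | h
        · subst h; exact hrest _ (List.mem_cons_self ..)
        · exact hcur x h

lemma pv_words_spec (text : String) (h : Dom_nomem13_encode text) :
    ∀ w ∈ PySem.Str.split₀ text, w ≠ "" ∧ ∀ c ∈ w.toList, pvDomChar c = true := by
  intro w hw
  have hd : ∀ c ∈ text.toList, pvDomChar c = true := by
    intro c hc
    exact List.all_eq_true.mp h c hc
  rcases List.mem_map.mp hw with ⟨l, hl, rfl⟩
  have := pv_split₀_go_spec (fun c => pvDomChar c = true) text.toList [] []
    hd (by simp) (by simp) l hl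
  refine ⟨?_, by simpa using this.2⟩
  intro hcon
  apply this.1
  have h2 := congrArg String.toList hcon
  simpa using h2

-- ===== VERDICT (by name: the statement is the Claim_ definition above) =====
set_option maxRecDepth 40000 in
theorem nomem13_encode_spec : Claim_equal_nomem13_encode := by
  intro text hdom
  unfold Spec_nomem13_encode nomem13_encode nomem13_encode_alt
  dsimp only
  have hws := pv_words_spec text hdom
  refine congrArg (fun l => "::k13:: " ++ PySem.Str.join " " l) ?_
  rw [PySem.List.foldl_congr_mem (PySem.Str.split₀ text)
      _ (fun acc w => acc ++ [String.ofList (w.toList.map pvStepB)]) []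
      ?_]
  · rw [PySem.List.foldl_append_singleton_eq_map]
    simp only [List.nil_append]
    rfl
  · intro acc w hw
    obtain ⟨hne, hdomw⟩ := hws w hw
    by_cases hdig : PySem.Str.strIsdigit w
    · simp only [hdig, if_pos]
      have h1 : flip_digits w = String.ofList (w.toList.map pvStepB) := by
        unfold flip_digits
        refine congrArg String.ofList (List.map_congr_left ?_)
        intro c hc
        have hall : PySem.Chars.isdigit c = true := by
          rw [PySem.Str.strIsdigit_eq] at hdig
          unfold PySem.Chars.strIsdigit at hdig
          exact (List.all_eq_true.mp (Bool.and_elim_right hdig)) c hc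
        exact pv_flip_eq c (hdomw c hc) hall
      rw [h1]
    · simp only [hdig, Bool.false_eq_true, hne, if_neg, not_false_iff]
      refine congrArg (fun l => acc ++ [String.ofList l]) ?_
      have hbody : ∀ (t : List Char), ∀ ch ∈ w.toList,
          (if PySem.Chars.upperChar ch = 'M' then t ++ [ch]
           else if PySem.Chars.isalpha ch then t ++ [rotate_char ch
             (if "aeiou".toList.contains (PySem.Chars.lowerChar
               ((PySem.List.pyGet? w.toList 0).getD ' ')) then 13 else -13)]
           else if PySem.Chars.isdigit ch then t ++ [PySem.Dict.getD DIGIT_FLIP ch ch]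
           else t ++ [ch]) =
          t ++ [pvStepA (if "aeiou".toList.contains (PySem.Chars.lowerChar
               ((PySem.List.pyGet? w.toList 0).getD ' ')) then 13 else -13) ch] := by
        intro t ch _
        unfold pvStepA
        split_ifs <;> rfl
      rw [PySem.List.foldl_congr_mem w.toList _ _ [] hbody,
          PySem.List.foldl_append_singleton_eq_map]
      simp only [List.nil_append]
      refine List.map_congr_left ?_
      intro c hc
      exact pv_stepA_eq c (hdomw c hc) _ (by split_ifs <;> simp)
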